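-- pv_equiv track=rewrite | github.com/darioradio1man/cmc_msu_2019 | bitcoding.py | encode
-- ===== SOURCE A (Python) =====
-- def encode(txt):
--     dictionary = {}
--     for i in txt:
--         if i in dictionary:
--             dictionary[i] += 1
--         else:
--             dictionary[i] = 1
--     keys = list(dictionary.keys())
--     keys.sort(key=lambda x: (dictionary[x], x), reverse=True)
--
--     bits_dictionary = {}
--     begin = 0
--     for i, val in enumerate(keys):
--         v = begin
--         begin += 1 << (i + 1)
--         bits_dictionary[val] = (v, i + 1)
--
--     length = 0
--     result = 0
--     accurcy = []
--     for wd in txt: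
--         length += bits_dictionary[wd][1]
--         result <<= bits_dictionary[wd][1]
--         result += bits_dictionary[wd][0]
--         while length >= 6:
--             accurcy.append(chr(32 + ((result >> (length - 6)) & 63)))
--             length -= 6
--         result &= 63
--
--     if length != 0:
--         k = (result << (6 - length)) & 63
--         accurcy.append(chr(32 + k))
--
--     while result % 64:
--         result <<= 1
--
--     return len(txt), "".join(keys), "".join(accurcy)
-- ===== SOURCE B (Python) =====
-- def encode(txt):
--     chars = list(txt)
--     order = list(dict.fromkeys(chars))
--     counts = {c: chars.count(c) for c in order}
--     keys = sorted(order, key=lambda c: (counts[c], c), reverse=True)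
--     codes = {c: ((1 << (i + 1)) - 2, i + 1) for i, c in enumerate(keys)}
--
--     def pack(seq):
--         # (value, bitlength) of the concatenated codes of seq, combined in balanced halves
--         if not seq:
--             return (0, 0)
--         if len(seq) == 1:
--             return codes[seq[0]]
--         m = len(seq) // 2
--         v1, l1 = pack(seq[:m])
--         v2, l2 = pack(seq[m:])
--         return ((v1 << l2) | v2, l1 + l2)
--
--     def chunks(m, k):
--         # the k base-64 digits of m (MSB first) as printable chars, by halving
--         if k == 1:
--             return [chr(32 + (m & 63))]
--         h = k // 2
--         t = k - h
--         return chunks(m >> (6 * t), h) + chunks(m & ((1 << (6 * t)) - 1), t)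
--
--     stream, nbits = pack(chars)
--     kstr = "".join(keys)
--     if nbits == 0:
--         return len(txt), kstr, ""
--     ngroups = (nbits + 5) // 6
--     stream <<= ngroups * 6 - nbits
--     return len(txt), kstr, "".join(chunks(stream, ngroups))
-- ===== Notes on version B (the rewrite author's own statement) =====
-- stated objective: alternative
-- what changed: B replaces A's per-character 6-bit sliding window (an inner while-loop draining a running register) with balanced divide-and-conquer big-integer packing of all codes followed by halving-based base-64 digit extraction, assigns each code value by the closed form 2**(i+1)-2 instead of A's running accumulator, counts frequencies by a dict comprehension over the distinct characters instead of A's increment loop, and drops A's dead final doubling loop whose local variable is never used.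
import Mathlib
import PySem

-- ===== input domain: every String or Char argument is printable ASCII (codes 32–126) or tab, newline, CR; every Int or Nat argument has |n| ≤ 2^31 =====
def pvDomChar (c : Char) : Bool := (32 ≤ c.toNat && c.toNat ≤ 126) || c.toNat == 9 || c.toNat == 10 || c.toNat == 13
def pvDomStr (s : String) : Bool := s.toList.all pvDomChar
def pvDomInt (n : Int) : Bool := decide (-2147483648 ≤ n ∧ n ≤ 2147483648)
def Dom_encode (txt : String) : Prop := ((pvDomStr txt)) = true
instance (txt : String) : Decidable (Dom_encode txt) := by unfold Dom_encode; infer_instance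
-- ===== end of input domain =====

-- B re-decomposes A's bit emission: instead of A's running 6-bit window drained inside the loop, B packs
-- all codes into one big integer and slices its base-64 digits at the end (objective: alternative).
-- All Python ints below (counts, code values, bit lengths) are manifestly nonnegative; they are ported as Nat,
-- with '<< k' as '* 2 ^ k' / '<<<', '>> k' as '/ 2 ^ k' / '>>>', '& 63' as '% 64' / '&&& 63' — exact on nonnegative ints.

-- ===== PORT A =====
-- dictionary = {}; for i in txt: if i in dictionary: dictionary[i] += 1 else: dictionary[i] = 1
def countA (cs : List Char) : PySem.Dict Char Int :=
  cs.foldl (fun d i => if d.contains i then d.modify i 0 (· + 1) else d.insert i 1) PySem.Dict.empty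

-- keys = list(dictionary.keys()); keys.sort(key=lambda x: (dictionary[x], x), reverse=True)
def keysA (cs : List Char) : List Char :=
  PySem.List.sorted2 (countA cs).keys (fun x => (countA cs).getD x 0) (fun x => x) true

-- begin = 0; for i, val in enumerate(keys): v = begin; begin += 1 << (i + 1); bits_dictionary[val] = (v, i + 1)
def bitsA (keys : List Char) : PySem.Dict Char (Nat × Nat) :=
  ((PySem.List.enumerate keys).foldl
    (fun (s : Nat × PySem.Dict Char (Nat × Nat)) p =>
      (s.1 + 2 ^ (p.1.toNat + 1), s.2.insert p.2 (s.1, p.1.toNat + 1)))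
    (0, PySem.Dict.empty)).2

-- while length >= 6: accurcy.append(chr(32 + ((result >> (length - 6)) & 63))); length -= 6
def drainA (len res : Nat) (acc : List Char) : Nat × List Char :=
  if 6 ≤ len then drainA (len - 6) res (acc ++ [Char.ofNat (32 + res / 2 ^ (len - 6) % 64)])
  else (len, acc)
termination_by len
decreasing_by omega

-- while result % 64: result <<= 1   (rewrites only the local 'result', unused afterwards; each doubling
-- adds a factor 2 until 2^6 divides the value, hence it terminates)
def padTwos (r : Nat) : Nat :=
  if h : r % 64 = 0 then r else padTwos (r * 2)
termination_by 6 - padicValNat 2 r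
decreasing_by
  have hr : r ≠ 0 := by omega
  have h2 : padicValNat 2 (r * 2) = padicValNat 2 r + 1 := by
    rw [padicValNat.mul hr (by norm_num)]
    norm_num [padicValNat.self]
  have h6 : padicValNat 2 r < 6 := by
    by_contra hle
    rw [not_lt] at hle
    have hdvd : (64 : Nat) ∣ r := by
      have : (2 : Nat) ^ 6 ∣ r := dvd_trans (pow_dvd_pow 2 hle) pow_padicValNat_dvd
      norm_num at this
      exact this
    omega
  omega

-- length = 0; result = 0; accurcy = []; for wd in txt: …  (bits_dictionary[wd] always hits: default never read)
def mainA (bd : PySem.Dict Char (Nat × Nat)) (cs : List Char) : Nat × Nat × List Char :=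
  cs.foldl (fun (s : Nat × Nat × List Char) wd =>
      let c := bd.getD wd (0, 1)
      let length := s.1 + c.2
      let result := s.2.1 * 2 ^ c.2 + c.1
      let d := drainA length result s.2.2
      (d.1, result % 64, d.2))
    (0, 0, [])

def encode (txt : String) : Int × String × String :=
  let cs := txt.toList
  let keys := keysA cs
  let st := mainA (bitsA keys) cs
  let accurcy := if st.1 ≠ 0 then st.2.2 ++ [Char.ofNat (32 + st.2.1 * 2 ^ (6 - st.1) % 64)] else st.2.2
  let _dead := padTwos st.2.1
  (PySem.Str.len txt, String.ofList keys, String.ofList accurcy)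

-- ===== PORT B =====
-- order = list(dict.fromkeys(chars)); counts = {c: chars.count(c) for c in order}
def countsB (cs : List Char) : PySem.Dict Char Int :=
  (PySem.List.dedup cs).foldl (fun d c => d.insert c ((PySem.List.count cs c : Nat) : Int)) PySem.Dict.empty

-- keys = sorted(order, key=lambda c: (counts[c], c), reverse=True)
def keysB (cs : List Char) : List Char :=
  PySem.List.sorted2 (PySem.List.dedup cs) (fun c => (countsB cs).getD c 0) (fun c => c) true

-- codes = {c: ((1 << (i + 1)) - 2, i + 1) for i, c in enumerate(keys)}
def codesB (keys : List Char) : PySem.Dict Char (Nat × Nat) :=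
  (PySem.List.enumerate keys).foldl
    (fun d p => d.insert p.2 (2 ^ (p.1.toNat + 1) - 2, p.1.toNat + 1)) PySem.Dict.empty

-- def pack(seq): (value, bitlength) of the concatenated codes of seq, combined in balanced halves
-- (codes[seq[0]] always hits: the default is never read)
def packB (codes : PySem.Dict Char (Nat × Nat)) (cs : List Char) : Nat × Nat :=
  match cs with
  | [] => (0, 0)
  | [c] => codes.getD c (0, 1)
  | c1 :: c2 :: rest =>
    let m := (c1 :: c2 :: rest).length / 2
    let a := packB codes ((c1 :: c2 :: rest).take m)
    let b := packB codes ((c1 :: c2 :: rest).drop m)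
    (a.1 <<< b.2 ||| b.1, a.2 + b.2)
termination_by cs.length
decreasing_by
  · simp [List.length_take]; omega
  · simp; omega

-- def chunks(m, k): the k base-64 digits of m (MSB first) as chars, by halving
-- (Python never reaches k = 0: the [] there is arbitrary)
def groupsR (m k : Nat) : List Char :=
  if k = 0 then []
  else if k = 1 then [Char.ofNat (32 + (m &&& 63))]
  else
    let h := k / 2
    let t := k - h
    groupsR (m >>> (6 * t)) h ++ groupsR (m &&& (2 ^ (6 * t) - 1)) t
termination_by k
decreasing_by
  · omega
  · omega

def encode_alt (txt : String) : Int × String × String :=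
  let cs := txt.toList
  let keys := keysB cs
  let st := packB (codesB keys) cs
  let kstr := String.ofList keys
  if st.2 = 0 then (PySem.Str.len txt, kstr, "")
  else
    let ngroups := (st.2 + 5) / 6
    let stream := st.1 <<< (ngroups * 6 - st.2)
    (PySem.Str.len txt, kstr, String.ofList (groupsR stream ngroups))

-- ===== PRECONDITION & SPEC =====
def Spec_encode (txt : String) (out : Int × String × String) : Prop := out = encode_alt txt
instance (txt : String) (out : Int × String × String) : Decidable (Spec_encode txt out) := by unfold Spec_encode; infer_instance

-- ===== CLAIM (what is proved, stated in full; the proofs are below) =====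
def Claim_equal_encode : Prop := ∀ (txt : String), Dom_encode txt → Spec_encode txt (encode txt)

-- ===== LEMMAS AND PROOFS =====

-- MSB-first fixed-width base-64 digit list of m (width k); digit g is m / 64^(k-1-g) % 64.
def digitsW : Nat → Nat → List Nat
  | 0, _ => []
  | k + 1, m => (m / 64 ^ k % 64) :: digitsW k m

lemma digitsW_congr {k a b : Nat} (h : a % 64 ^ k = b % 64 ^ k) : digitsW k a = digitsW k b := by
  induction k with
  | zero => rfl
  | succ k ih =>
    have hk : a % 64 ^ k = b % 64 ^ k := by
      have : (64:Nat) ^ k ∣ 64 ^ (k+1) := pow_dvd_pow _ (by omega)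
      rw [← Nat.mod_mod_of_dvd a this, ← Nat.mod_mod_of_dvd b this, h]
    have hd : a / 64 ^ k % 64 = b / 64 ^ k % 64 := by
      rw [← Nat.mod_mul_right_div_self, ← Nat.mod_mul_right_div_self, ← pow_succ, h]
    simp [digitsW, hd, ih hk]

lemma digitsW_append (q k m : Nat) : digitsW (q + k) m = digitsW q (m / 64 ^ k) ++ digitsW k m := by
  induction q with
  | zero => simp [digitsW]
  | succ q ih =>
    have h1 : q + 1 + k = (q + k) + 1 := by omega
    rw [h1]
    show (m / 64 ^ (q+k) % 64) :: digitsW (q+k) m = _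
    rw [ih]
    have h2 : m / 64 ^ k / 64 ^ q = m / 64 ^ (q + k) := by
      rw [Nat.div_div_eq_div_mul, ← pow_add, Nat.add_comm]
    simp [digitsW, h2]

lemma pow64 (k : Nat) : (64 : Nat) ^ k = 2 ^ (6 * k) := by rw [pow_mul]; norm_num

lemma groupsR_eq (k : Nat) (hk : 1 ≤ k) : ∀ m : Nat,
    groupsR m k = (digitsW k m).map (fun d => Char.ofNat (32 + d)) := by
  induction k using Nat.strong_induction_on with
  | _ k ih =>
    intro m
    rw [groupsR]
    rcases Nat.lt_or_ge k 2 with hk2 | hk2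
    · have hk1 : k = 1 := by omega
      subst hk1
      have hand := Nat.and_two_pow_sub_one_eq_mod m 6
      norm_num at hand
      simp [digitsW, hand]
    · rw [if_neg (by omega), if_neg (by omega)]
      show groupsR (m >>> (6 * (k - k / 2))) (k / 2)
          ++ groupsR (m &&& (2 ^ (6 * (k - k / 2)) - 1)) (k - k / 2) = _
      have hh1 : 1 ≤ k / 2 := by omega
      have ht1 : 1 ≤ k - k / 2 := by omega
      rw [ih (k / 2) (by omega) hh1, ih (k - k / 2) (by omega) ht1]
      have e1 : m >>> (6 * (k - k / 2)) = m / 64 ^ (k - k / 2) := by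
        rw [Nat.shiftRight_eq_div_pow, pow64]
      have e2 : m &&& (2 ^ (6 * (k - k / 2)) - 1) = m % 64 ^ (k - k / 2) := by
        rw [Nat.and_two_pow_sub_one_eq_mod, pow64]
      rw [e1, e2, digitsW_congr (Nat.mod_mod_of_dvd m dvd_rfl), ← List.map_append, ← digitsW_append,
        show k / 2 + (k - k / 2) = k from by omega]

-- B's balanced packing equals the left-to-right packing fold …
lemma foldl_pack_shift (codes : PySem.Dict Char (Nat × Nat)) (cs : List Char) (S L : Nat) :
    cs.foldl (fun (s : Nat × Nat) c =>
      let p := codes.getD c (0, 1)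
      (s.1 <<< p.2 ||| p.1, s.2 + p.2)) (S, L)
    = (S <<< (cs.foldl (fun (s : Nat × Nat) c =>
          let p := codes.getD c (0, 1)
          (s.1 <<< p.2 ||| p.1, s.2 + p.2)) (0, 0)).2
         ||| (cs.foldl (fun (s : Nat × Nat) c =>
          let p := codes.getD c (0, 1)
          (s.1 <<< p.2 ||| p.1, s.2 + p.2)) (0, 0)).1,
       L + (cs.foldl (fun (s : Nat × Nat) c =>
          let p := codes.getD c (0, 1)
          (s.1 <<< p.2 ||| p.1, s.2 + p.2)) (0, 0)).2) := by
  induction cs generalizing S L with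
  | nil => simp
  | cons c cs ih =>
    simp only [List.foldl_cons]
    rw [ih, ih (0 <<< (codes.getD c (0,1)).2 ||| (codes.getD c (0,1)).1)]
    simp only [Nat.zero_shiftLeft, Nat.zero_or, Nat.zero_add, Prod.mk.injEq]
    constructor
    · rw [Nat.shiftLeft_or_distrib, ← Nat.shiftLeft_add, Nat.or_assoc]
    · omega

-- … which is the shape the loop invariant below talks about
lemma packB_eq_foldl (codes : PySem.Dict Char (Nat × Nat)) (cs : List Char) :
    packB codes cs = cs.foldl (fun (s : Nat × Nat) c =>
      let p := codes.getD c (0, 1)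
      (s.1 <<< p.2 ||| p.1, s.2 + p.2)) (0, 0) := by
  induction hN : cs.length using Nat.strong_induction_on generalizing cs with
  | _ N ih =>
    match cs with
    | [] => simp [packB]
    | [c] => simp [packB]
    | c1 :: c2 :: rest =>
      rw [packB]
      have hlen : (c1 :: c2 :: rest).length = N := hN
      set s := c1 :: c2 :: rest with hs
      set m := s.length / 2 with hm
      have hge : 2 ≤ s.length := by rw [hs]; simp [List.length_cons]
      have h1 : (s.take m).length < N := by simp [List.length_take]; omega
      have h2 : (s.drop m).length < N := by simp; omega
      rw [ih _ h1 _ rfl, ih _ h2 _ rfl]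
      conv_rhs => rw [← List.take_append_drop m s, List.foldl_append]
      rcases hPP : List.foldl (fun (s : Nat × Nat) c =>
          let p := codes.getD c (0, 1)
          (s.1 <<< p.2 ||| p.1, s.2 + p.2)) (0, 0) (s.take m) with ⟨PS, PL⟩
      rw [foldl_pack_shift codes (s.drop m) PS PL]

lemma drainA_spec (r0 : Nat) (hr : r0 < 6) (k res : Nat) (acc : List Char) :
    drainA (r0 + 6 * k) res acc
      = (r0, acc ++ (digitsW k (res / 2 ^ r0)).map (fun d => Char.ofNat (32 + d))) := by
  induction k generalizing acc with
  | zero => rw [drainA]; simp [digitsW]; omega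
  | succ k ih =>
    rw [drainA, if_pos (by omega)]
    have e1 : r0 + 6 * (k + 1) - 6 = r0 + 6 * k := by omega
    rw [e1, ih]
    have e2 : res / 2 ^ (r0 + 6 * k) = res / 2 ^ r0 / 64 ^ k := by
      rw [Nat.div_div_eq_div_mul, pow64, ← pow_add]
    simp [digitsW, e2]

-- A's counting loop is Counter(txt)
lemma countA_eq (cs : List Char) : countA cs = PySem.Dict.counter cs := by
  rw [PySem.Dict.counter_eq_foldl, countA]
  congr 1
  funext d i
  by_cases h : d.contains i
  · simp [h]
  · have h0 : d.getD i 0 = 0 := PySem.Dict.getD_of_not_contains d 0 (by simpa using h)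
    simp [h, PySem.Dict.modify, h0]

-- B's comprehension of chars.count agrees with Counter on every key
lemma countsB_getD (cs : List Char) (c : Char) :
    (countsB cs).getD c 0 = ((List.count c cs : Nat) : Int) := by
  have hnd := PySem.List.nodup_dedup cs
  have hitems := PySem.Dict.items_foldl_insert_fresh (PySem.List.dedup cs) id
      (fun c => ((PySem.List.count cs c : Nat) : Int)) PySem.Dict.empty
      (by intro a _; simp [PySem.Dict.contains_empty]) (by simp only [List.map_id]; exact hnd)
  simp only [id] at hitems
  have hkeys : (countsB cs).keys = PySem.List.dedup cs := by
    show ((countsB cs).items).map (·.1) = _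
    rw [countsB, hitems]
    simp [PySem.Dict.empty, Function.comp_def]
  by_cases hc : c ∈ PySem.List.dedup cs
  · apply PySem.Dict.getD_of_mem_items _ _ (by rw [hkeys]; exact hnd)
    rw [countsB, hitems]
    refine List.mem_append.mpr (Or.inr ?_)
    exact List.mem_map.mpr ⟨c, hc, by simp [PySem.List.count_eq]⟩
  · have hcf : (countsB cs).contains c = false := by
      rw [← Bool.not_eq_true, PySem.Dict.contains_iff_mem_keys, hkeys]
      exact hc
    rw [PySem.Dict.getD_of_not_contains _ 0 hcf]
    rw [PySem.List.mem_dedup] at hc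
    simp [List.count_eq_zero_of_not_mem hc]

lemma keysA_eq_keysB (cs : List Char) : keysA cs = keysB cs := by
  rw [keysA, keysB, countA_eq, PySem.Dict.keys_counter]
  have h1 : (fun x : Char => (PySem.Dict.counter cs).getD x 0)
      = (fun c : Char => (countsB cs).getD c 0) := by
    funext x
    rw [PySem.Dict.getD_counter, countsB_getD]
  rw [h1, PySem.List.dedup_eq_ofList]

-- A's running 'begin' accumulator equals B's closed form 2^(i+1) - 2
lemma bits_fold (xs : List Char) : ∀ (s : Nat) (d : PySem.Dict Char (Nat × Nat)),
    (PySem.List.enumerate xs (s : Int)).foldl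
      (fun (t : Nat × PySem.Dict Char (Nat × Nat)) p =>
        (t.1 + 2 ^ (p.1.toNat + 1), t.2.insert p.2 (t.1, p.1.toNat + 1)))
      (2 ^ (s + 1) - 2, d)
    = (2 ^ (s + xs.length + 1) - 2,
       (PySem.List.enumerate xs (s : Int)).foldl
         (fun d' p => d'.insert p.2 (2 ^ (p.1.toNat + 1) - 2, p.1.toNat + 1)) d) := by
  induction xs with
  | nil => intro s d; simp [PySem.List.enumerate_nil]
  | cons x xs ih =>
    intro s d
    rw [PySem.List.enumerate_cons]
    simp only [List.foldl_cons, Int.toNat_natCast]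
    have hcast : (s : Int) + 1 = ((s + 1 : Nat) : Int) := by push_cast; ring
    have hbegin : 2 ^ (s + 1) - 2 + 2 ^ (s + 1) = 2 ^ (s + 1 + 1) - 2 := by
      have h2 : (2:Nat) ^ (s + 1 + 1) = 2 ^ (s + 1) * 2 := by rw [pow_succ]
      have h3 : (2:Nat) ≤ 2 ^ (s + 1) := by
        calc (2:Nat) = 2 ^ 1 := by norm_num
        _ ≤ 2 ^ (s + 1) := Nat.pow_le_pow_right (by norm_num) (by omega)
      omega
    rw [hcast, hbegin, ih (s + 1) (d.insert x (2 ^ (s + 1) - 2, s + 1))]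
    have h4 : s + 1 + xs.length = s + (x :: xs).length := by simp; omega
    rw [h4]

lemma bitsA_eq_codesB (keys : List Char) : bitsA keys = codesB keys := by
  have h := bits_fold keys 0 PySem.Dict.empty
  simp only [Nat.cast_zero, Nat.zero_add, pow_one, Nat.sub_self] at h
  rw [bitsA, h]
  rfl

lemma codesB_getD (keys : List Char) (hnd : keys.Nodup) (c : Char) (hc : c ∈ keys) :
    ∃ i : Nat, (codesB keys).getD c (0, 1) = (2 ^ (i + 1) - 2, i + 1) := by
  have hitems := PySem.Dict.items_foldl_insert_fresh (PySem.List.enumerate keys 0) (·.2)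
      (fun p => ((2:Nat) ^ (p.1.toNat + 1) - 2, p.1.toNat + 1)) PySem.Dict.empty
      (by intro a _; simp [PySem.Dict.contains_empty])
      (by rw [PySem.List.map_snd_enumerate]; exact hnd)
  have hkeys : (codesB keys).keys = keys := by
    show ((codesB keys).items).map (·.1) = _
    rw [codesB, hitems]
    simp [PySem.Dict.empty, Function.comp_def]
  obtain ⟨k, hk, hkc⟩ := List.mem_iff_getElem.mp hc
  refine ⟨k, ?_⟩
  have hmem : ((0 : Int) + (k : Int), keys[k]) ∈ PySem.List.enumerate keys 0 :=
    (PySem.List.mem_enumerate_iff keys 0 _).mpr ⟨k, hk, rfl⟩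
  have hpair : (c, ((2:Nat) ^ (k + 1) - 2, k + 1)) ∈ (codesB keys).items := by
    rw [codesB, hitems]
    refine List.mem_append.mpr (Or.inr ?_)
    refine List.mem_map.mpr ⟨((0 : Int) + (k : Int), keys[k]), hmem, ?_⟩
    simp [hkc]
  exact PySem.Dict.getD_of_mem_items _ hpair (by rw [hkeys]; exact hnd) _

lemma shiftor (S v n : Nat) (hv : v < 2 ^ n) : S <<< n ||| v = S * 2 ^ n + v := by
  rw [Nat.shiftLeft_eq, Nat.mul_comm, ← Nat.two_pow_add_eq_or_of_lt hv S, Nat.mul_comm]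

lemma step_mod (res S r n v : Nat) (h3 : res % 2 ^ r = S % 2 ^ r) :
    (res * 2 ^ n + v) % 2 ^ (r + n) = (S * 2 ^ n + v) % 2 ^ (r + n) := by
  have key : ∀ x : Nat, (x * 2 ^ n) % 2 ^ (r + n) = (x % 2 ^ r) * 2 ^ n := by
    intro x; rw [pow_add, Nat.mul_mod_mul_right]
  rw [Nat.add_mod, key, h3, ← key, ← Nat.add_mod]

lemma div_mod_shift (a b s m : Nat) (h : a % (2 ^ s * m) = b % (2 ^ s * m)) :
    a / 2 ^ s % m = b / 2 ^ s % m := by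
  rw [← Nat.mod_mul_right_div_self, ← Nat.mod_mul_right_div_self, h]

lemma mainInv (bd : PySem.Dict Char (Nat × Nat)) (cs : List Char)
    (hc : ∀ c ∈ cs, (bd.getD c (0, 1)).1 < 2 ^ (bd.getD c (0, 1)).2 ∧ 1 ≤ (bd.getD c (0, 1)).2)
    (r res S L : Nat) (acc : List Char)
    (h1 : r = L % 6) (h2 : res ≤ 63) (h3 : res % 2 ^ r = S % 2 ^ r) (h4 : S < 2 ^ L)
    (h5 : acc = (digitsW (L / 6) (S / 2 ^ r)).map (fun d => Char.ofNat (32 + d))) :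
    (cs.foldl (fun (s : Nat × Nat × List Char) wd =>
      let c := bd.getD wd (0, 1)
      let length := s.1 + c.2
      let result := s.2.1 * 2 ^ c.2 + c.1
      let d := drainA length result s.2.2
      (d.1, result % 64, d.2)) (r, res, acc),
     cs.foldl (fun (s : Nat × Nat) c =>
      let p := bd.getD c (0, 1)
      (s.1 <<< p.2 ||| p.1, s.2 + p.2)) (S, L))
    ∈ {x : (Nat × Nat × List Char) × (Nat × Nat) |
        x.1.1 = x.2.2 % 6 ∧ x.1.2.1 ≤ 63 ∧ x.1.2.1 % 2 ^ x.1.1 = x.2.1 % 2 ^ x.1.1 ∧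
        x.2.1 < 2 ^ x.2.2 ∧
        x.1.2.2 = (digitsW (x.2.2 / 6) (x.2.1 / 2 ^ x.1.1)).map (fun d => Char.ofNat (32 + d)) ∧
        L + cs.length ≤ x.2.2} := by
  induction cs generalizing r res S L acc with
  | nil =>
    simp only [List.foldl_nil, Set.mem_setOf_eq]
    exact ⟨h1, h2, h3, h4, h5, by simp⟩
  | cons c cs ih =>
    obtain ⟨hv, hn⟩ := hc c (List.mem_cons_self ..)
    simp only [List.foldl_cons]
    set v := (bd.getD c (0, 1)).1 with hvdef
    set n := (bd.getD c (0, 1)).2 with hndef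
    set r' := (r + n) % 6 with hr'
    set k := (r + n) / 6 with hk
    have hsplit : r + n = r' + 6 * k := by omega
    have hM : (2:Nat) ^ r' * 64 ^ k = 2 ^ (r + n) := by
      rw [pow64, ← pow_add]; congr 1; omega
    have hmod := step_mod res S r n v h3
    have hdrain : drainA (r + n) (res * 2 ^ n + v) acc
        = (r', acc ++ (digitsW k ((res * 2 ^ n + v) / 2 ^ r')).map (fun d => Char.ofNat (32 + d))) := by
      rw [hsplit]; exact drainA_spec r' (by omega) k _ acc
    have hSdiv : (S * 2 ^ n + v) / 2 ^ (r + n) = S / 2 ^ r := by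
      have h6 : (2:Nat) ^ (r + n) = 2 ^ n * 2 ^ r := by rw [← pow_add]; congr 1; omega
      rw [h6, ← Nat.div_div_eq_div_mul]
      congr 1
      rw [Nat.mul_comm S, Nat.mul_add_div (Nat.pow_pos (a := 2) (by norm_num)), Nat.div_eq_of_lt hv]
      omega
    have goal5 : acc ++ (digitsW k ((res * 2 ^ n + v) / 2 ^ r')).map (fun d => Char.ofNat (32 + d))
        = (digitsW ((L + n) / 6) ((S * 2 ^ n + v) / 2 ^ r')).map (fun d => Char.ofNat (32 + d)) := by
      have hq : (L + n) / 6 = L / 6 + k := by omega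
      rw [hq, digitsW_append, List.map_append, h5]
      congr 2
      · rw [Nat.div_div_eq_div_mul, hM, hSdiv]
      · exact (digitsW_congr (div_mod_shift _ _ _ _ (by rw [hM]; exact hmod.symm))).symm
    rw [shiftor S v n hv, hdrain]
    have := ih (fun c' hc' => hc c' (List.mem_cons_of_mem _ hc'))
      r' ((res * 2 ^ n + v) % 64) (S * 2 ^ n + v) (L + n)
      (acc ++ (digitsW k ((res * 2 ^ n + v) / 2 ^ r')).map (fun d => Char.ofNat (32 + d)))
      (by omega) (by omega)
      (by
        have d1 : (res * 2 ^ n + v) % 64 % 2 ^ r' = (res * 2 ^ n + v) % 2 ^ r' := by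
          apply Nat.mod_mod_of_dvd
          exact (by norm_num : (64:Nat) = 2 ^ 6) ▸ pow_dvd_pow 2 (by omega)
        have d2 : ∀ x : Nat, x % 2 ^ r' = x % 2 ^ (r + n) % 2 ^ r' := by
          intro x; rw [Nat.mod_mod_of_dvd _ (pow_dvd_pow 2 (by omega))]
        rw [d1, d2 (res * 2 ^ n + v), hmod, ← d2])
      (by
        calc S * 2 ^ n + v < S * 2 ^ n + 2 ^ n := by omega
        _ = (S + 1) * 2 ^ n := by ring
        _ ≤ 2 ^ L * 2 ^ n := Nat.mul_le_mul_right _ (by omega)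
        _ = 2 ^ (L + n) := by rw [pow_add])
      goal5
    simp only [Set.mem_setOf_eq] at this ⊢
    refine ⟨this.1, this.2.1, this.2.2.1, this.2.2.2.1, this.2.2.2.2.1, ?_⟩
    have h6 := this.2.2.2.2.2
    simp only [List.length_cons]
    omega

lemma keysB_nodup (cs : List Char) : (keysB cs).Nodup :=
  (PySem.List.sorted2_perm _ _ _ _).nodup_iff.mpr (PySem.List.nodup_dedup cs)

lemma mem_keysB (cs : List Char) (c : Char) (hc : c ∈ cs) : c ∈ keysB cs :=
  (PySem.List.sorted2_perm _ _ _ _).mem_iff.mpr ((PySem.List.mem_dedup cs c).mpr hc)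

lemma codes_prop (cs : List Char) : ∀ c ∈ cs,
    ((codesB (keysB cs)).getD c (0, 1)).1 < 2 ^ ((codesB (keysB cs)).getD c (0, 1)).2 ∧
    1 ≤ ((codesB (keysB cs)).getD c (0, 1)).2 := by
  intro c hc
  obtain ⟨i, hi⟩ := codesB_getD (keysB cs) (keysB_nodup cs) c (mem_keysB cs c hc)
  rw [hi]
  have h2 : (2:Nat) ≤ 2 ^ (i + 1) := by
    calc (2:Nat) = 2 ^ 1 := by norm_num
    _ ≤ 2 ^ (i + 1) := Nat.pow_le_pow_right (by norm_num) (by omega)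
  exact ⟨by show (2:Nat) ^ (i + 1) - 2 < 2 ^ (i + 1); omega, by show 1 ≤ i + 1; omega⟩

lemma encode_eq (txt : String) : encode txt = encode_alt txt := by
  have hmain := mainInv (codesB (keysB txt.toList)) txt.toList (codes_prop txt.toList)
    0 0 0 0 [] rfl (by norm_num) rfl (by norm_num) rfl
  simp only [Set.mem_setOf_eq] at hmain
  simp only [encode, encode_alt, keysA_eq_keysB, bitsA_eq_codesB]
  set cs := txt.toList with hcs
  set a := mainA (codesB (keysB cs)) cs with ha
  set b := packB (codesB (keysB cs)) cs with hb
  have hmain' : a.1 = b.2 % 6 ∧ a.2.1 ≤ 63 ∧ a.2.1 % 2 ^ a.1 = b.1 % 2 ^ a.1 ∧ b.1 < 2 ^ b.2 ∧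
      a.2.2 = (digitsW (b.2 / 6) (b.1 / 2 ^ a.1)).map (fun d => Char.ofNat (32 + d)) ∧
      0 + cs.length ≤ b.2 := by
    rw [ha, hb, mainA, packB_eq_foldl]
    exact hmain
  obtain ⟨e1, e2, e3, e4, e5, e6⟩ := hmain'
  by_cases hL : b.2 = 0
  · have hnil : cs = [] := List.eq_nil_of_length_eq_zero (by omega)
    have han : a = (0, 0, []) := by rw [ha, hnil]; rfl
    rw [if_pos hL, han]
    simp
  · rw [if_neg hL]
    set q := b.2 / 6 with hq
    by_cases hr : a.1 = 0
    · -- no leftover bits: b.2 is a multiple of 6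
      have hng : (b.2 + 5) / 6 = q := by omega
      have hsh : q * 6 - b.2 = 0 := by omega
      have hq1 : 1 ≤ q := by omega
      rw [if_neg (by simpa using hr), hng, hsh, groupsR_eq q hq1]
      have hstream : b.1 <<< 0 = b.1 := by simp [Nat.shiftLeft_eq]
      rw [hstream]
      have : a.2.2 = (digitsW q b.1).map (fun d => Char.ofNat (32 + d)) := by
        rw [e5, hr]; norm_num
      rw [this]
    · -- a partial last group of a.1 = b.2 % 6 bits, padded by 6 - a.1 zero bits
      have hng : (b.2 + 5) / 6 = q + 1 := by omega
      have hsh : (q + 1) * 6 - b.2 = 6 - a.1 := by omega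
      rw [if_pos (by simpa using hr), hng, hsh, groupsR_eq (q + 1) (by omega), Nat.shiftLeft_eq]
      have hsplit : digitsW (q + 1) (b.1 * 2 ^ (6 - a.1))
          = digitsW q (b.1 * 2 ^ (6 - a.1) / 64 ^ 1) ++ digitsW 1 (b.1 * 2 ^ (6 - a.1)) := digitsW_append q 1 _
      have hd1 : b.1 * 2 ^ (6 - a.1) / 64 ^ 1 = b.1 / 2 ^ a.1 := by
        have h64 : (64:Nat) ^ 1 = 2 ^ (6 - a.1) * 2 ^ a.1 := by
          rw [← pow_add, show 6 - a.1 + a.1 = 6 from by omega]; norm_num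
        rw [h64, ← Nat.div_div_eq_div_mul, Nat.mul_div_cancel _ (Nat.pow_pos (a := 2) (by norm_num))]
      have hd2 : (b.1 * 2 ^ (6 - a.1)) % 64 = a.2.1 * 2 ^ (6 - a.1) % 64 := by
        have hkey : ∀ x : Nat, (x * 2 ^ (6 - a.1)) % 64 = (x % 2 ^ a.1) * 2 ^ (6 - a.1) := by
          intro x
          rw [show (64:Nat) = 2 ^ a.1 * 2 ^ (6 - a.1) from by
                rw [← pow_add, show a.1 + (6 - a.1) = 6 from by omega]; norm_num,
              Nat.mul_mod_mul_right]
        rw [hkey, hkey, e3]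
      have hone : digitsW 1 (b.1 * 2 ^ (6 - a.1)) = [(b.1 * 2 ^ (6 - a.1)) % 64] := by
        show [(b.1 * 2 ^ (6 - a.1)) / 64 ^ 0 % 64] = _
        rw [pow_zero, Nat.div_one]
      rw [hsplit, hone, hd1, hd2, List.map_append, e5]
      simp

-- ===== VERDICT (by name: the statement is the Claim_ definition above) =====
theorem encode_spec : Claim_equal_encode := by
  intro txt _
  unfold Spec_encode
  exact encode_eq txt
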